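-- pv_equiv track=rewrite | github.com/israelboudoux/Q4034-computational-bioinformatics | assignment_03/israel/run.py | update_codons
-- ===== SOURCE A (Python) =====
-- def complement(codon):
--     return codon.replace('A', 'U').replace('T', 'A').replace('C', '-').replace('G', 'C').replace('-', 'G')
--
-- def update_codons(seq_line, codons_stats):
--     for idx_codon in range(0, len(seq_line), 3):
--         codon = complement(seq_line[idx_codon: idx_codon + 3])
--         if codon in codons_stats:
--             codons_stats[codon] += 1
--         elif len(codon) == 3:
--             codons_stats[codon] = 1
--         else:
--             return seq_line[idx_codon: len(seq_line)]  # returns the incomplete codon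
--
--     return ""
-- ===== SOURCE B (Python) =====
-- def update_codons(seq_line, codons_stats):
--     n = len(seq_line)
--     rem = n % 3
--     comp = seq_line.translate(str.maketrans('ATCG', 'UAGC'))
--     codons = [comp[i:i + 3] for i in range(0, n - rem, 3)]
--     for c in dict.fromkeys(codons):
--         codons_stats[c] = codons_stats.get(c, 0) + codons.count(c)
--     return seq_line[n - rem:] if rem else ''
-- ===== Notes on version B (the rewrite author's own statement) =====
-- stated objective: alternative
-- what changed: Replaced A's single streaming loop (per-codon complement, dict membership test, increment, early return) by a staged pipeline: complement the whole string once with str.translate, build the list of full codons, deduplicate it with dict.fromkeys, add codons.count(c) into codons_stats for each distinct codon, and compute the trailing incomplete fragment arithmetically from len%3 instead of by an early return.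
-- intended difference: When len(seq_line)%3 != 0 and the complement of the trailing 1-2 character fragment is already a key of codons_stats, A counts that incomplete fragment as a codon and returns '', while B leaves it uncounted and returns the fragment itself, which is the intended value per A's own comment ('returns the incomplete codon'). — e.g. on update_codons("T", [("A", 1)]): A returns "", B returns "T"
import Mathlib
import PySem

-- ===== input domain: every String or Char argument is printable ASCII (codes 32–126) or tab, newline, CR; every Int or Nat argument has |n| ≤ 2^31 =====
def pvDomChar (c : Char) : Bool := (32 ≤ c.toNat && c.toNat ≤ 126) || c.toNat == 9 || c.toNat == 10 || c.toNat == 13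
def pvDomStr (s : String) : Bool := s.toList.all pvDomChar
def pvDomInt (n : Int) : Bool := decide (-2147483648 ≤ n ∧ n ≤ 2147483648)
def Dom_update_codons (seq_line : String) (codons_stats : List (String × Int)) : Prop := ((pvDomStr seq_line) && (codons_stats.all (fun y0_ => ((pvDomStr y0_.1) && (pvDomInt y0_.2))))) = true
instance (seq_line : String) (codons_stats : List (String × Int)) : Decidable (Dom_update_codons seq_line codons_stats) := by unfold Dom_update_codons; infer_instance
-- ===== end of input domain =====

-- B replaces A's single streaming loop (per-codon complement, membership test, increment, early return)
-- by a staged pipeline: complement the whole string once, build the codon list, dedupe it, add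
-- codons.count(c) per distinct codon, and compute the trailing fragment arithmetically from len%3.
-- Equivalence is claimed for the RETURN VALUE only — both Pythons mutate codons_stats, and on
-- D_-inputs (and on inputs containing '-') the mutations differ.

-- ===== PORT A =====
-- complement(codon): the five-step str.replace chain, ported with PySem.Str.replace (exact)
def complementA (codon : String) : String :=
  PySem.Str.replace (PySem.Str.replace (PySem.Str.replace (PySem.Str.replace
    (PySem.Str.replace codon "A" "U") "T" "A") "C" "-") "G" "C") "-" "G"

-- `codon in codons_stats` (dict key membership)
def pyContainsKey (d : List (String × Int)) (k : String) : Bool := d.any (fun kv => kv.1 == k)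

-- `codons_stats[codon] += 1` (key exists: update in place)
def dictIncr (d : List (String × Int)) (k : String) : List (String × Int) :=
  match d with
  | [] => []
  | (k', v) :: t => if k' == k then (k', v + 1) :: t else (k', v) :: dictIncr t k

-- the `for idx_codon in range(0, len(seq_line), 3)` loop; `rest` is seq_line[idx_codon:], so
-- seq_line[idx_codon : idx_codon+3] = rest.take 3 and the early return value is rest itself
def updLoopA (d : List (String × Int)) (rest : List Char) : String :=
  if h : rest = [] then ""
  else
    let codon := complementA (String.ofList (rest.take 3))
    if pyContainsKey d codon then updLoopA (dictIncr d codon) (rest.drop 3)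
    else if PySem.Str.len codon == 3 then updLoopA (d ++ [(codon, 1)]) (rest.drop 3)
    else String.ofList rest
termination_by rest.length
decreasing_by all_goals
  · have : 0 < rest.length := List.length_pos_iff.mpr h
    simp only [List.length_drop]; omega

def update_codons (seq_line : String) (codons_stats : List (String × Int)) : String :=
  updLoopA codons_stats seq_line.toList

-- ===== PORT B =====
-- seq_line.translate(str.maketrans('ATCG','UAGC')): the per-character table
def compCharB (c : Char) : Char :=
  if c = 'A' then 'U' else if c = 'T' then 'A' else if c = 'C' then 'G' else if c = 'G' then 'C' else c

-- codons_stats.get(c, 0)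
def dictGetD (d : List (String × Int)) (k : String) : Int := ((List.lookup k d).getD 0)

-- `d[k] = v` on a dict: overwrite in place, else append
def dictSet (d : List (String × Int)) (k : String) (v : Int) : List (String × Int) :=
  match d with
  | [] => [(k, v)]
  | (k', v') :: t => if k' == k then (k', v) :: t else (k', v') :: dictSet t k v

def update_codons_alt (seq_line : String) (codons_stats : List (String × Int)) : String :=
  let s := seq_line.toList
  let n := s.length
  let rem := n % 3
  let comp := s.map compCharB
  let codons := (PySem.List.pyRange 0 (Int.ofNat (n - rem)) 3).map
      (fun i => String.ofList ((comp.drop i.toNat).take 3))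
  -- for c in dict.fromkeys(codons): codons_stats[c] = codons_stats.get(c,0) + codons.count(c)
  -- (mutation of the argument; the value is unused by the returned string)
  let _merged := (PySem.List.dedup codons).foldl
      (fun d c => dictSet d c (dictGetD d c + (PySem.List.count codons c : Int))) codons_stats
  if rem = 0 then "" else String.ofList (s.drop (n - rem))

-- ===== PRECONDITION & SPEC =====
-- character-level description of A's complement as a lookup table (used only by D_ and the proofs, not by either port)
def complPairs : List (Char × Char) := [('A', 'U'), ('T', 'A'), ('C', 'G'), ('G', 'C'), ('-', 'G')]
def complChar (c : Char) : Char := (complPairs.lookup c).getD c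

-- When len(seq_line)%3 ≠ 0 and the complement of the trailing 1-2 character fragment is already a key of
-- codons_stats, A counts that incomplete fragment as a codon and returns "", while B leaves it uncounted and
-- returns the fragment itself, which is the intended value per A's own comment ("returns the incomplete codon").
def D_update_codons (seq_line : String) (codons_stats : List (String × Int)) : Prop :=
  seq_line.toList.length % 3 ≠ 0 ∧
  String.ofList ((seq_line.toList.drop (seq_line.toList.length - seq_line.toList.length % 3)).map complChar)
    ∈ codons_stats.map Prod.fst
instance (seq_line : String) (codons_stats : List (String × Int)) : Decidable (D_update_codons seq_line codons_stats) := by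
  unfold D_update_codons; infer_instance

def Spec_update_codons (seq_line : String) (codons_stats : List (String × Int)) (out : String) : Prop :=
  ¬ D_update_codons seq_line codons_stats → out = update_codons_alt seq_line codons_stats
instance (seq_line : String) (codons_stats : List (String × Int)) (out : String) : Decidable (Spec_update_codons seq_line codons_stats out) := by
  unfold Spec_update_codons; infer_instance

def pvDiffWitness_update_codons : String × (List (String × Int)) := ("T", [("A", 1)])
def pvDiffWitnessOut_update_codons : String × String := ("", "T")

-- ===== CLAIM (what is proved, stated in full; the proofs are below) =====
def Claim_unchanged_update_codons : Prop := ∀ (seq_line : String) (codons_stats : List (String × Int)), Dom_update_codons seq_line codons_stats → Spec_update_codons seq_line codons_stats (update_codons seq_line codons_stats)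
def Claim_changed_update_codons : Prop := Dom_update_codons (pvDiffWitness_update_codons.1) (pvDiffWitness_update_codons.2) ∧ D_update_codons (pvDiffWitness_update_codons.1) (pvDiffWitness_update_codons.2) ∧ update_codons (pvDiffWitness_update_codons.1) (pvDiffWitness_update_codons.2) = pvDiffWitnessOut_update_codons.1 ∧ update_codons_alt (pvDiffWitness_update_codons.1) (pvDiffWitness_update_codons.2) = pvDiffWitnessOut_update_codons.2 ∧ pvDiffWitnessOut_update_codons.1 ≠ pvDiffWitnessOut_update_codons.2
def Claim_exact_update_codons : Prop := ∀ (seq_line : String) (codons_stats : List (String × Int)), Dom_update_codons seq_line codons_stats → D_update_codons seq_line codons_stats → update_codons seq_line codons_stats ≠ update_codons_alt seq_line codons_stats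

-- ===== LEMMAS AND PROOFS =====
theorem go_single (a b : Char) : ∀ (fuel : Nat) (l acc : List Char), l.length ≤ fuel →
    PySem.Chars.replace.go [a] [b] fuel l acc
      = acc.reverse ++ l.map (fun c => if c = a then b else c) := by
  intro fuel
  induction fuel with
  | zero =>
    intro l acc h
    have hl : l = [] := List.eq_nil_of_length_eq_zero (Nat.le_zero.mp h)
    subst hl; rw [PySem.Chars.replace.go.eq_def]; simp
  | succ n ih =>
    intro l acc h
    cases l with
    | nil => rw [PySem.Chars.replace.go.eq_def]; simp
    | cons c t =>
      rw [PySem.Chars.replace.go.eq_def]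
      by_cases hac : a = c
      · subst hac
        simp only [List.isPrefixOf, beq_self_eq_true]
        simp only [List.length_cons, List.length_nil, List.drop_succ_cons, List.drop_zero]
        rw [ih t ([b].reverse ++ acc) (by simpa using h)]
        simp
      · have : ([a].isPrefixOf (c :: t)) = false := by
          simp [List.isPrefixOf, hac]
        simp only [this, Bool.false_eq_true, if_false]
        rw [ih t (c :: acc) (by simpa using h)]
        simp
        exact fun hca => absurd hca.symm hac

theorem replace_single (a b : Char) (l : List Char) :
    PySem.Chars.replace l [a] [b] = l.map (fun c => if c = a then b else c) := by
  rw [PySem.Chars.replace]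
  simp [go_single a b l.length l [] le_rfl]

theorem chainA (c : Char) :
    (fun x => if x = '-' then 'G' else x)
      ((fun x => if x = 'G' then 'C' else x)
        ((fun x => if x = 'C' then '-' else x)
          ((fun x => if x = 'T' then 'A' else x)
            ((fun x => if x = 'A' then 'U' else x) c)))) = complChar c := by
  by_cases h1 : c = 'A'
  · subst h1; decide
  by_cases h2 : c = 'T'
  · subst h2; decide
  by_cases h3 : c = 'C'
  · subst h3; decide
  by_cases h4 : c = 'G'
  · subst h4; decide
  by_cases h5 : c = '-'
  · subst h5; decide
  have e1 : (c == 'A') = false := beq_eq_false_iff_ne.mpr h1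
  have e2 : (c == 'T') = false := beq_eq_false_iff_ne.mpr h2
  have e3 : (c == 'C') = false := beq_eq_false_iff_ne.mpr h3
  have e4 : (c == 'G') = false := beq_eq_false_iff_ne.mpr h4
  have e5 : (c == '-') = false := beq_eq_false_iff_ne.mpr h5
  simp [complChar, complPairs, List.lookup, e1, e2, e3, e4, e5, h1, h2, h3, h4, h5]

theorem complementA_eq (l : List Char) :
    complementA (String.ofList l) = String.ofList (l.map complChar) := by
  apply String.toList_inj.mp
  simp only [complementA, PySem.Str.toList_replace]
  have hm : (String.ofList l).toList = l := String.toList_ofList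
  rw [hm]
  simp only [show "A".toList = ['A'] from rfl, show "U".toList = ['U'] from rfl,
    show "T".toList = ['T'] from rfl, show "C".toList = ['C'] from rfl,
    show "G".toList = ['G'] from rfl, show "-".toList = ['-'] from rfl]
  rw [replace_single 'A' 'U' l, replace_single 'T' 'A' _, replace_single 'C' '-' _,
      replace_single 'G' 'C' _, replace_single '-' 'G' _]
  simp only [List.map_map, Function.comp_def]
  have : (String.ofList (l.map complChar)).toList = l.map complChar := String.toList_ofList
  rw [this]
  exact List.map_congr_left (fun c _ => chainA c)

theorem pyContainsKey_dictIncr (d : List (String × Int)) (k k' : String) :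
    pyContainsKey (dictIncr d k) k' = pyContainsKey d k' := by
  induction d with
  | nil => rfl
  | cons kv t ih =>
    obtain ⟨k₀, v₀⟩ := kv
    simp only [dictIncr]
    split_ifs <;> simp_all [pyContainsKey]

theorem pyContainsKey_append (d : List (String × Int)) (c : String) (v : Int) (k' : String) :
    pyContainsKey (d ++ [(c, v)]) k' = (pyContainsKey d k' || c == k') := by
  simp [pyContainsKey, List.any_append]

theorem len_complementA (l : List Char) :
    PySem.Str.len (complementA (String.ofList l)) = (l.length : Int) := by
  rw [complementA_eq, PySem.Str.len_eq, String.toList_ofList, List.length_map]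

set_option maxHeartbeats 1000000 in
theorem updLoopA_spec :
    ∀ (rest : List Char) (d : List (String × Int)),
      (rest.length % 3 ≠ 0 →
        pyContainsKey d (String.ofList ((rest.drop (rest.length - rest.length % 3)).map complChar)) = false) →
      updLoopA d rest =
        if rest.length % 3 = 0 then "" else String.ofList (rest.drop (rest.length - rest.length % 3)) := by
  intro rest d
  induction d, rest using updLoopA.induct with
  | case1 d => intro _; simp [updLoopA]
  | case2 d rest hne codon hmem ih =>
    intro h
    have hmem' : pyContainsKey d (complementA (String.ofList (rest.take 3))) = true := hmem
    have h0 : rest.length ≠ 0 := fun e => hne (List.eq_nil_of_length_eq_zero e)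
    by_cases hlen : rest.length < 3
    · exfalso
      have hrem : rest.length % 3 = rest.length := Nat.mod_eq_of_lt hlen
      have htake : rest.take 3 = rest := List.take_of_length_le (by omega)
      have hdrop : rest.drop (rest.length - rest.length % 3) = rest := by rw [hrem]; simp
      have hfalse := h (by omega)
      rw [hdrop] at hfalse
      rw [htake, complementA_eq, hfalse] at hmem'
      exact Bool.false_ne_true hmem'
    · have h3 : 3 ≤ rest.length := by omega
      have htail : (rest.drop 3).drop ((rest.drop 3).length - (rest.drop 3).length % 3)
          = rest.drop (rest.length - rest.length % 3) := by
        have harith : 3 + ((rest.drop 3).length - (rest.drop 3).length % 3)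
          = rest.length - rest.length % 3 := by
          simp only [List.length_drop]; omega
        rw [List.drop_drop, harith]
      have hrem : (rest.drop 3).length % 3 = rest.length % 3 := by
        simp only [List.length_drop]; omega
      have e := ih (by
        intro hnz
        rw [htail, pyContainsKey_dictIncr]
        exact h (by simp only [List.length_drop] at hnz; omega))
      rw [htail, hrem] at e
      rw [updLoopA.eq_def]
      simp only [dif_neg hne]
      rw [if_pos hmem']
      exact e
  | case3 d rest hne codon hmem hlen3 ih =>
    intro h
    have hmem' : pyContainsKey d (complementA (String.ofList (rest.take 3))) = false := Bool.eq_false_iff.mpr hmem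
    have hlen3' : (PySem.Str.len (complementA (String.ofList (rest.take 3))) == 3) = true := hlen3
    have hlc := len_complementA (rest.take 3)
    have h0 : rest.length ≠ 0 := fun e => hne (List.eq_nil_of_length_eq_zero e)
    have hlen3'' : PySem.Str.len (complementA (String.ofList (rest.take 3))) = 3 := eq_of_beq hlen3'
    have htk : ((rest.take 3).length : Int) = 3 := by rw [← hlc, hlen3'']
    have h3 : 3 ≤ rest.length := by
      simp only [List.length_take] at htk
      omega
    have htail : (rest.drop 3).drop ((rest.drop 3).length - (rest.drop 3).length % 3)
        = rest.drop (rest.length - rest.length % 3) := by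
      have harith : 3 + ((rest.drop 3).length - (rest.drop 3).length % 3)
        = rest.length - rest.length % 3 := by
        simp only [List.length_drop]; omega
      rw [List.drop_drop, harith]
    have hrem : (rest.drop 3).length % 3 = rest.length % 3 := by
      simp only [List.length_drop]; omega
    have e := ih (by
      intro hnz
      have hnz' : rest.length % 3 ≠ 0 := by simp only [List.length_drop] at hnz; omega
      rw [htail, pyContainsKey_append]
      have hkeq : (complementA (String.ofList (rest.take 3))
          == String.ofList ((rest.drop (rest.length - rest.length % 3)).map complChar)) = false := by
        rw [beq_eq_false_iff_ne]
        intro he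
        have hl2 := congrArg PySem.Str.len he
        rw [len_complementA, PySem.Str.len_eq, String.toList_ofList, List.length_map,
          List.length_drop] at hl2
        simp only [List.length_take] at hl2
        omega
      rw [h hnz', hkeq]
      rfl)
    rw [htail, hrem] at e
    rw [updLoopA.eq_def]
    simp only [dif_neg hne]
    rw [if_neg (ne_true_of_eq_false hmem'), if_pos hlen3']
    exact e
  | case4 d rest hne codon hmem hlen3 =>
    intro h
    have hmem' : pyContainsKey d (complementA (String.ofList (rest.take 3))) = false := Bool.eq_false_iff.mpr hmem
    have hlen3' : (PySem.Str.len (complementA (String.ofList (rest.take 3))) == 3) = false := Bool.eq_false_iff.mpr hlen3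
    have hlc := len_complementA (rest.take 3)
    have h0 : rest.length ≠ 0 := fun e => hne (List.eq_nil_of_length_eq_zero e)
    have hlen : rest.length < 3 := by
      by_contra hc
      have htk : (rest.take 3).length = 3 := by
        simp only [List.length_take]; omega
      rw [htk] at hlc
      rw [beq_eq_false_iff_ne] at hlen3'
      exact hlen3' (by rw [hlc]; norm_num)
    have hrem : rest.length % 3 = rest.length := Nat.mod_eq_of_lt hlen
    rw [updLoopA.eq_def]
    simp only [dif_neg hne]
    rw [if_neg (ne_true_of_eq_false hmem'), if_neg (ne_true_of_eq_false hlen3')]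
    rw [if_neg (by omega), hrem]
    simp

theorem pyContainsKey_iff_mem (d : List (String × Int)) (k : String) :
    pyContainsKey d k = true ↔ k ∈ d.map Prod.fst := by
  simp [pyContainsKey, List.any_eq_true, List.mem_map, beq_iff_eq]

set_option maxHeartbeats 1000000 in
theorem updLoopA_mem :
    ∀ (rest : List Char) (d : List (String × Int)),
      rest.length % 3 ≠ 0 →
      pyContainsKey d (String.ofList ((rest.drop (rest.length - rest.length % 3)).map complChar)) = true →
      updLoopA d rest = "" := by
  intro rest d
  induction d, rest using updLoopA.induct with
  | case1 d => intro _ _; simp [updLoopA]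
  | case2 d rest hne codon hmem ih =>
    intro hnz hk
    have hmem' : pyContainsKey d (complementA (String.ofList (rest.take 3))) = true := hmem
    rw [updLoopA.eq_def]
    simp only [dif_neg hne]
    rw [if_pos hmem']
    by_cases hlen : rest.length < 3
    · have : rest.drop 3 = [] := List.drop_eq_nil_of_le (by omega)
      rw [this]
      simp [updLoopA]
    · have h3 : 3 ≤ rest.length := by omega
      have harith : 3 + ((rest.drop 3).length - (rest.drop 3).length % 3)
          = rest.length - rest.length % 3 := by
        simp only [List.length_drop]; omega
      have htail : (rest.drop 3).drop ((rest.drop 3).length - (rest.drop 3).length % 3)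
          = rest.drop (rest.length - rest.length % 3) := by
        rw [List.drop_drop, harith]
      exact ih (by simp only [List.length_drop]; omega)
        (by rw [htail, pyContainsKey_dictIncr]; exact hk)
  | case3 d rest hne codon hmem hlen3 ih =>
    intro hnz hk
    have hmem' : pyContainsKey d (complementA (String.ofList (rest.take 3))) = false :=
      Bool.eq_false_iff.mpr hmem
    have hlen3' : (PySem.Str.len (complementA (String.ofList (rest.take 3))) == 3) = true := hlen3
    have hlc := len_complementA (rest.take 3)
    have hlen3'' : PySem.Str.len (complementA (String.ofList (rest.take 3))) = 3 := eq_of_beq hlen3'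
    have htk : ((rest.take 3).length : Int) = 3 := by rw [← hlc, hlen3'']
    have h3 : 3 ≤ rest.length := by
      simp only [List.length_take] at htk
      omega
    have harith : 3 + ((rest.drop 3).length - (rest.drop 3).length % 3)
        = rest.length - rest.length % 3 := by
      simp only [List.length_drop]; omega
    have htail : (rest.drop 3).drop ((rest.drop 3).length - (rest.drop 3).length % 3)
        = rest.drop (rest.length - rest.length % 3) := by
      rw [List.drop_drop, harith]
    rw [updLoopA.eq_def]
    simp only [dif_neg hne]
    rw [if_neg (ne_true_of_eq_false hmem'), if_pos hlen3']
    refine ih (by simp only [List.length_drop]; omega) ?_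
    rw [htail, pyContainsKey_append, hk]
    rfl
  | case4 d rest hne codon hmem hlen3 =>
    intro hnz hk
    exfalso
    have hmem' : pyContainsKey d (complementA (String.ofList (rest.take 3))) = false :=
      Bool.eq_false_iff.mpr hmem
    have hlen3' : (PySem.Str.len (complementA (String.ofList (rest.take 3))) == 3) = false :=
      Bool.eq_false_iff.mpr hlen3
    have hlc := len_complementA (rest.take 3)
    have h0 : rest.length ≠ 0 := fun e => hne (List.eq_nil_of_length_eq_zero e)
    have hlen : rest.length < 3 := by
      by_contra hc
      have htk : (rest.take 3).length = 3 := by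
        simp only [List.length_take]; omega
      rw [htk] at hlc
      rw [beq_eq_false_iff_ne] at hlen3'
      exact hlen3' (by rw [hlc]; norm_num)
    have hrem : rest.length % 3 = rest.length := Nat.mod_eq_of_lt hlen
    have htake : rest.take 3 = rest := List.take_of_length_le (by omega)
    have hdrop : rest.drop (rest.length - rest.length % 3) = rest := by rw [hrem]; simp
    rw [hdrop] at hk
    rw [htake, complementA_eq] at hmem'
    rw [hmem'] at hk
    exact Bool.false_ne_true hk

-- ===== VERDICT (by name: the statement is the Claim_ definition above) =====
theorem update_codons_spec : Claim_unchanged_update_codons := by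
  intro seq_line codons_stats _ hnD
  unfold update_codons update_codons_alt
  rw [updLoopA_spec seq_line.toList codons_stats ?_]
  · intro hnz
    rw [Bool.eq_false_iff]
    intro hmem
    exact hnD ⟨hnz, (pyContainsKey_iff_mem _ _).mp hmem⟩

theorem update_codons_changed : Claim_changed_update_codons := by
  unfold Claim_changed_update_codons
  refine ⟨by decide, by decide, ?_, by decide, by decide⟩
  show update_codons "T" [("A", 1)] = ""
  unfold update_codons
  exact updLoopA_mem ['T'] [("A", 1)] (by decide) (by decide)

theorem update_codons_tight : Claim_exact_update_codons := by
  intro seq_line codons_stats _ hD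
  obtain ⟨hnz, hmem⟩ := hD
  unfold update_codons update_codons_alt
  rw [updLoopA_mem seq_line.toList codons_stats hnz
    ((pyContainsKey_iff_mem _ _).mpr hmem)]
  rw [if_neg hnz]
  intro heq
  have := congrArg String.toList heq
  rw [String.toList_ofList] at this
  have h2 : seq_line.toList.drop (seq_line.toList.length - seq_line.toList.length % 3) = [] := by
    rw [← String.toList_ofList
      (l := seq_line.toList.drop (seq_line.toList.length - seq_line.toList.length % 3)), ← this]
  have hlen := congrArg List.length h2
  simp only [List.length_drop, List.length_nil] at hlen
  omega
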